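-- pv_equiv track=rewrite | github.com/tisttsf/algs_final | algs_combinations.py | permutation_repeated
-- ===== SOURCE A (Python) =====
-- def permutation_repeated(n,m,cur,all_result):
-- 	if m==0:
-- 		d=cur[:]
-- 		all_result.append(d)
-- 		return
-- 	for i in n:
-- 		cur=cur[:]+[i]
-- 		permutation_repeated(n,m-1,cur,all_result)
-- 		cur=cur[:-1]
-- 	return all_result
-- ===== SOURCE B (Python) =====
-- def permutation_repeated(n, m, cur, all_result):
--     if m == 0:
--         all_result.append(list(cur))
--         return None
--     partials = [list(cur)]
--     for _ in range(m):
--         partials = [p + [i] for p in partials for i in n]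
--     all_result.extend(partials)
--     return all_result
-- ===== Notes on version B (the rewrite author's own statement) =====
-- stated objective: alternative
-- what changed: Replaces the depth-first recursion that mutates all_result per leaf with an iterative breadth-first worklist: partials is extended one position per round for m rounds, then appended to all_result in one extend.
-- outside the precondition, e.g. on permutation_repeated([], -1, [], []): A returns [], B returns [[]]
import Mathlib
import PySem

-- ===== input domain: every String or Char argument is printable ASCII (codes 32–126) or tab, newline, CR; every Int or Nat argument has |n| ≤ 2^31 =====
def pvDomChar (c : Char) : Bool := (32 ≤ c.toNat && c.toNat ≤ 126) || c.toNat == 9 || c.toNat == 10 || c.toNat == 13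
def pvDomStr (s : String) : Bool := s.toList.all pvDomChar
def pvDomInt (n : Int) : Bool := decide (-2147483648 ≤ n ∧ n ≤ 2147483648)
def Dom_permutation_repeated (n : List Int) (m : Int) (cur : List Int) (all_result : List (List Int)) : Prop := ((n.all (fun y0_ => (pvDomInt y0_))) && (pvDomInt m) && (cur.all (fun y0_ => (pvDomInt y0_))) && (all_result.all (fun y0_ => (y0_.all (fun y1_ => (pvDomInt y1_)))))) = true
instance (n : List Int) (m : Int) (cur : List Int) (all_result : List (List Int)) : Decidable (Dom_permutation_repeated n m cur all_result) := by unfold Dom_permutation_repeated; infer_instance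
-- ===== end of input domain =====

-- B replaces A's depth-first recursion with an iterative breadth-first worklist (same cost);
-- both mutate all_result in Python with the same net effect on Pre_, and the theorems are about the return value.

-- ===== PORT A =====
-- state-threading model of A's recursion: goA returns the contents of all_result after the call
def goA (n : List Int) : Nat → List Int → List (List Int) → List (List Int)
  | 0, cur, acc => acc ++ [cur]
  | k+1, cur, acc => List.foldl (fun acc i => goA n k (cur ++ [i]) acc) acc n

def permutation_repeated (n : List Int) (m : Int) (cur : List Int) (all_result : List (List Int)) : Option (List (List Int)) :=
  if m = 0 then none
  else some (List.foldl (fun acc i => goA n (m - 1).toNat (cur ++ [i]) acc) all_result n)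

-- ===== PORT B =====
-- one round of B's comprehension [p + [i] for p in partials for i in n]
def bStep (n : List Int) (ps : List (List Int)) : List (List Int) :=
  ps.flatMap (fun p => n.map (fun i => p ++ [i]))

def permutation_repeated_alt (n : List Int) (m : Int) (cur : List Int) (all_result : List (List Int)) : Option (List (List Int)) :=
  if m = 0 then none
  else some (all_result ++ (PySem.List.pyRange 0 m 1).foldl (fun ps _ => bStep n ps) [cur])

-- ===== PRECONDITION & SPEC =====
-- Pre_ excludes negative m: there A's recursion never reaches the base case, raising RecursionError
-- whenever n is nonempty, and for empty n its unchanged return is an accident of the empty loop on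
-- an unspecified corner (sequences of negative length), where B returns all_result with cur appended.
def Pre_permutation_repeated (n : List Int) (m : Int) (cur : List Int) (all_result : List (List Int)) : Prop := 0 ≤ m
instance (n : List Int) (m : Int) (cur : List Int) (all_result : List (List Int)) : Decidable (Pre_permutation_repeated n m cur all_result) := by unfold Pre_permutation_repeated; infer_instance

def pvWitness_permutation_repeated : List Int × Int × List Int × List (List Int) := ([1, 2], 2, [0], [[7]])

def Spec_permutation_repeated (n : List Int) (m : Int) (cur : List Int) (all_result : List (List Int)) (out : Option (List (List Int))) : Prop := out = permutation_repeated_alt n m cur all_result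
instance (n : List Int) (m : Int) (cur : List Int) (all_result : List (List Int)) (out : Option (List (List Int))) : Decidable (Spec_permutation_repeated n m cur all_result out) := by unfold Spec_permutation_repeated; infer_instance

-- ===== CLAIM (what is proved, stated in full; the proofs are below) =====
def Claim_equal_permutation_repeated : Prop := ∀ (n : List Int) (m : Int) (cur : List Int) (all_result : List (List Int)), Dom_permutation_repeated n m cur all_result → Pre_permutation_repeated n m cur all_result → Spec_permutation_repeated n m cur all_result (permutation_repeated n m cur all_result)

-- ===== LEMMAS AND PROOFS =====
-- the mathematical object both programs build: all length-k right-extensions of cur by elements of n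
def ext (n : List Int) : Nat → List Int → List (List Int)
  | 0, cur => [cur]
  | k+1, cur => n.flatMap (fun i => ext n k (cur ++ [i]))

theorem goA_eq_ext (n : List Int) : ∀ (k : Nat) (cur : List Int) (acc : List (List Int)),
    goA n k cur acc = acc ++ ext n k cur := by
  intro k
  induction k with
  | zero => intro cur acc; rfl
  | succ k ih =>
    intro cur acc
    show List.foldl (fun acc i => goA n k (cur ++ [i]) acc) acc n = acc ++ ext n (k+1) cur
    have h : ∀ (l : List Int) (acc : List (List Int)),
        List.foldl (fun acc i => goA n k (cur ++ [i]) acc) acc l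
          = acc ++ l.flatMap (fun i => ext n k (cur ++ [i])) := by
      intro l
      induction l with
      | nil => intro acc; simp
      | cons x xs ihx => intro acc; simp [List.foldl_cons, ih, List.append_assoc, List.flatMap_def]
    simpa [ext] using h n acc

def iterB (n : List Int) : Nat → List (List Int) → List (List Int)
  | 0, ps => ps
  | k+1, ps => iterB n k (bStep n ps)

theorem foldl_bStep_eq_iterB (n : List Int) (l : List Int) :
    ∀ (ps : List (List Int)),
    List.foldl (fun ps _ => bStep n ps) ps l = iterB n l.length ps := by
  induction l with
  | nil => intro ps; rfl
  | cons x xs ih => intro ps; simp [List.foldl_cons, ih, iterB]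

theorem iterB_append (n : List Int) : ∀ (k : Nat) (ps qs : List (List Int)),
    iterB n k (ps ++ qs) = iterB n k ps ++ iterB n k qs := by
  intro k
  induction k with
  | zero => intro ps qs; rfl
  | succ k ih => intro ps qs; simp [iterB, bStep, ih]

theorem iterB_nil (n : List Int) : ∀ (k : Nat), iterB n k [] = [] := by
  intro k
  induction k with
  | zero => rfl
  | succ k ih => simpa [iterB, bStep] using ih

theorem iterB_singleton_eq_ext (n : List Int) : ∀ (k : Nat) (p : List Int),
    iterB n k [p] = ext n k p := by
  intro k
  induction k with
  | zero => intro p; rfl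
  | succ k ih =>
    intro p
    show iterB n k (bStep n [p]) = ext n (k+1) p
    have hstep : bStep n [p] = n.map (fun i => p ++ [i]) := by simp [bStep]
    have hmap : ∀ (l : List Int),
        iterB n k (l.map (fun i => p ++ [i])) = l.flatMap (fun i => ext n k (p ++ [i])) := by
      intro l
      induction l with
      | nil => simpa using iterB_nil n k
      | cons x xs ihx =>
        have : (x :: xs).map (fun i => p ++ [i]) = [p ++ [x]] ++ xs.map (fun i => p ++ [i]) := by simp
        rw [this, iterB_append, ih, ihx]; simp
    rw [hstep, hmap]; rfl

theorem ext_succ_flatMap (n : List Int) (k : Nat) (cur : List Int) :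
    ext n (k+1) cur = n.flatMap (fun i => ext n k (cur ++ [i])) := rfl

-- ===== VERDICT (by name: the statement is the Claim_ definition above) =====
theorem permutation_repeated_spec : Claim_equal_permutation_repeated := by
  intro n m cur all_result _ hpre
  unfold Spec_permutation_repeated permutation_repeated permutation_repeated_alt
  by_cases hm : m = 0
  · simp [hm]
  · have hm1 : 1 ≤ m := by
      have : (0:Int) ≤ m := hpre
      omega
    simp only [if_neg hm]
    congr 1
    rw [foldl_bStep_eq_iterB, PySem.List.length_pyRange_one]
    have hk : (m - 0).toNat = (m - 1).toNat + 1 := by omega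
    rw [hk, iterB_singleton_eq_ext, ext_succ_flatMap]
    have h : ∀ (l : List Int) (acc : List (List Int)),
        List.foldl (fun acc i => goA n (m - 1).toNat (cur ++ [i]) acc) acc l
          = acc ++ l.flatMap (fun i => ext n (m - 1).toNat (cur ++ [i])) := by
      intro l
      induction l with
      | nil => intro acc; simp
      | cons x xs ihx =>
        intro acc
        simp [List.foldl_cons, goA_eq_ext, List.append_assoc, List.flatMap_def]
    exact h n all_result
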